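-- pv_equiv track=rewrite | github.com/DevGumbo/MasterFrameworkControls | analyzers/control_analyzer.py | _find_common_keywords
-- ===== SOURCE A (Python) =====
-- from typing import Dict, List, Set, Tuple
--
-- def _find_common_keywords(controls: List[Dict]) -> Set[str]:
--     """Find keywords common across controls"""
--     if not controls:
--         return set()
--
--     # Get keywords from first control
--     keywords = set(controls[0]['Title'].lower().split())
--
--     # Find intersection with other controls
--     for control in controls[1:]:
--         control_keywords = set(control['Title'].lower().split())
--         keywords = keywords.intersection(control_keywords)
--
--     return keywords
-- ===== SOURCE B (Python) =====
-- def _find_common_keywords(controls):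
--     """Find keywords common across controls"""
--     if not controls:
--         return set()
--     counts = {}
--     for control in controls:
--         for word in set(control['Title'].lower().split()):
--             counts[word] = counts.get(word, 0) + 1
--     total = len(controls)
--     return {word for word, c in counts.items() if c == total}
-- ===== Notes on version B (the rewrite author's own statement) =====
-- stated objective: alternative
-- what changed: B makes one pass tallying in a dict how many controls each deduplicated title word appears in and returns the words whose tally equals len(controls), instead of building a set per control and repeatedly intersecting a shrinking keyword set.
import Mathlib
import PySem

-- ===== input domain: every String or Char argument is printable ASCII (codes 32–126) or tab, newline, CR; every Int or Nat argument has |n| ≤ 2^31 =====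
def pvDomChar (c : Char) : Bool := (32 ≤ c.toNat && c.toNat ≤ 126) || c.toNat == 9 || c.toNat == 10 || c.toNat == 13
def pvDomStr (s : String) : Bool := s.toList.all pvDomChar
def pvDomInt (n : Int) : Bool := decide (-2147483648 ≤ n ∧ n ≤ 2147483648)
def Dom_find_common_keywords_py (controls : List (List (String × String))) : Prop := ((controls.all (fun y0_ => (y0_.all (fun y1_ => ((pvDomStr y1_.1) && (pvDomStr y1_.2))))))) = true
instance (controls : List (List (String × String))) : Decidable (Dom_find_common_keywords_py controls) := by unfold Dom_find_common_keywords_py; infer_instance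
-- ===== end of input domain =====

-- B tallies per-control-deduplicated title words in a dict in one pass and keeps those counted len(controls) times,
-- instead of A's pairwise set intersections (objective: alternative decomposition; same asymptotic cost).


-- ===== PORT A =====
-- set(control['Title'].lower().split()); the 'Title' lookup is guaranteed by Pre_ (getD's default is never reached there)
def pvTitleWords (control : List (String × String)) : PySem.Set String :=
  PySem.Set.ofList (PySem.Str.split₀ (PySem.Str.lower ((PySem.Dict.mk control).getD "Title" "")))

def find_common_keywords_py (controls : List (List (String × String))) : List String :=
  match controls with
  | [] => PySem.Set.empty
  | c0 :: rest =>
      rest.foldl (fun keywords control => PySem.Set.inter keywords (pvTitleWords control)) (pvTitleWords c0)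

-- ===== PORT B =====
def find_common_keywords_py_alt (controls : List (List (String × String))) : List String :=
  if controls.isEmpty then PySem.Set.empty
  else
    let counts : PySem.Dict String Int :=
      controls.foldl (fun d control =>
        (pvTitleWords control).foldl (fun d word => d.modify word 0 (· + 1)) d) PySem.Dict.empty
    ((counts.items.filter (fun p => p.2 == (controls.length : Int))).map (fun p => p.1))

-- ===== PRECONDITION & SPEC =====
-- Pre_ excludes exactly the inputs where the Python A raises KeyError: a control without a 'Title' key.
def Pre_find_common_keywords_py (controls : List (List (String × String))) : Prop :=
  ∀ c ∈ controls, (PySem.Dict.mk c).contains "Title" = true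
instance (controls : List (List (String × String))) : Decidable (Pre_find_common_keywords_py controls) := by unfold Pre_find_common_keywords_py; infer_instance
def pvWitness_find_common_keywords_py : (List (List (String × String))) := [[("Title", "Ensure S3 access"), ("Id", "c1")], [("Title", "access ensure logging")]]

def Spec_find_common_keywords_py (controls : List (List (String × String))) (out : List String) : Prop := out = find_common_keywords_py_alt controls
instance (controls : List (List (String × String))) (out : List String) : Decidable (Spec_find_common_keywords_py controls out) := by unfold Spec_find_common_keywords_py; infer_instance

-- ===== CLAIM (what is proved, stated in full; the proofs are below) =====
def Claim_equal_find_common_keywords_py : Prop := ∀ (controls : List (List (String × String))), Dom_find_common_keywords_py controls → Pre_find_common_keywords_py controls → Spec_find_common_keywords_py controls (find_common_keywords_py controls)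

-- ===== LEMMAS AND PROOFS =====

-- A's fold of intersections is one filter by membership in every remaining control's word set.
theorem pv_foldl_inter (rest : List (List (String × String))) (s : List String) :
    rest.foldl (fun keywords control => PySem.Set.inter keywords (pvTitleWords control)) s
      = s.filter (fun w => rest.all (fun c => (pvTitleWords c).contains w)) := by
  induction rest generalizing s with
  | nil => simp
  | cons c cs ih =>
      rw [List.foldl_cons, ih]
      show List.filter _ (List.filter _ s) = _
      rw [List.filter_filter]
      exact List.filter_congr (fun w _ => by simp [List.all_cons, Bool.and_comm])

-- B's nested fold builds Counter(controls.flatMap pvTitleWords).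
theorem pv_counts_eq_counter (controls : List (List (String × String))) :
    controls.foldl (fun d control =>
        (pvTitleWords control).foldl (fun d word => d.modify word 0 (· + 1)) d) PySem.Dict.empty
      = PySem.Dict.counter (controls.flatMap pvTitleWords) := by
  rw [PySem.Dict.counter_eq_foldl, List.flatMap, List.foldl_flatten, List.foldl_map]

theorem pv_count_flatMap (controls : List (List (String × String))) (w : String) :
    (controls.flatMap pvTitleWords).count w
      = controls.countP (fun c => (pvTitleWords c).contains w) := by
  induction controls with
  | nil => simp
  | cons c cs ih =>
      simp only [List.flatMap_cons, List.count_append, List.countP_cons, ih]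
      have hn : (pvTitleWords c).Nodup := PySem.Set.nodup_ofList _
      by_cases hw : w ∈ pvTitleWords c
      · rw [List.count_eq_one_of_mem hn hw]
        simp [PySem.Set.contains, hw, Nat.add_comm]
      · rw [List.count_eq_zero.mpr hw]
        simp [PySem.Set.contains, hw]

-- appending further elements to a set does not change a filter whose predicate implies membership in the base set
theorem pv_filter_foldl_add (p : String → Bool) (ys : List String) (s : List String)
    (h : ∀ y, p y = true → y ∈ s) :
    (ys.foldl PySem.Set.add s).filter p = s.filter p := by
  induction ys generalizing s with
  | nil => rfl
  | cons y ys ih =>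
      simp only [List.foldl_cons]
      by_cases hy : y ∈ s
      · rw [PySem.Set.add_of_mem hy]; exact ih s h
      · rw [PySem.Set.add_of_not_mem hy, ih (s ++ [y]) (fun z hz => List.mem_append_left _ (h z hz))]
        have hpy : p y = false := by
          by_contra hb
          exact hy (h y (by simpa using hb))
        simp [List.filter_append, hpy]

-- set(xs) of an already-duplicate-free list is that list
theorem pv_foldl_add_of_nodup (s acc : List String) (h : s.Nodup) (hd : ∀ x ∈ s, x ∉ acc) :
    s.foldl PySem.Set.add acc = acc ++ s := by
  induction s generalizing acc with
  | nil => simp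
  | cons x xs ih =>
      rw [List.foldl_cons, PySem.Set.add_of_not_mem (hd x (by simp))]
      rw [ih (acc ++ [x]) h.of_cons]
      · simp
      · intro y hy
        simp only [List.mem_append, List.mem_singleton]
        rintro (hya | rfl)
        · exact hd y (by simp [hy]) hya
        · exact (List.nodup_cons.mp h).1 hy

theorem pv_ofList_of_nodup (s : List String) (h : s.Nodup) : PySem.Set.ofList s = s := by
  rw [PySem.Set.ofList_eq_foldl]
  rw [pv_foldl_add_of_nodup s [] h (by simp)]
  simp

-- characterization of B on a non-empty input
theorem pv_alt_char (c0 : List (String × String)) (rest : List (List (String × String))) :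
    find_common_keywords_py_alt (c0 :: rest)
      = (PySem.Set.ofList ((c0 :: rest).flatMap pvTitleWords)).filter
          (fun k => ((((c0 :: rest).flatMap pvTitleWords).count k : Int) == ((c0 :: rest).length : Int))) := by
  simp only [find_common_keywords_py_alt, List.isEmpty_cons, Bool.false_eq_true, if_false,
    pv_counts_eq_counter, PySem.Dict.items_counter, List.filter_map, List.map_map]
  exact List.map_congr_left (fun p _ => rfl) |>.trans (List.map_id _) |>.symm ▸ rfl

-- ===== VERDICT (by name: the statement is the Claim_ definition above) =====
theorem find_common_keywords_py_spec : Claim_equal_find_common_keywords_py := by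
  intro controls _ _
  unfold Spec_find_common_keywords_py
  match controls with
  | [] => rfl
  | c0 :: rest =>
      rw [pv_alt_char]
      show rest.foldl _ (pvTitleWords c0) = _
      rw [pv_foldl_inter]
      have hnd : (pvTitleWords c0).Nodup := PySem.Set.nodup_ofList _
      have hofl : PySem.Set.ofList ((c0 :: rest).flatMap pvTitleWords)
          = (rest.flatMap pvTitleWords).foldl PySem.Set.add (pvTitleWords c0) := by
        rw [List.flatMap_cons, PySem.Set.ofList_eq_foldl, List.foldl_append,
          ← PySem.Set.ofList_eq_foldl, pv_ofList_of_nodup _ hnd]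
      rw [hofl, pv_filter_foldl_add]
      · refine (List.filter_congr fun w hw => ?_).symm
        rw [pv_count_flatMap]
        by_cases hall : ∀ c ∈ rest, (pvTitleWords c).contains w = true
        · have h1 : List.countP (fun c => (pvTitleWords c).contains w) (c0 :: rest)
              = (c0 :: rest).length := by
            refine List.countP_eq_length.mpr ?_
            intro c hc
            rcases List.mem_cons.mp hc with rfl | hc
            · simpa [PySem.Set.contains] using hw
            · exact hall c hc
          have hRHS : rest.all (fun c => (pvTitleWords c).contains w) = true :=
            List.all_eq_true.mpr hall
          rw [h1, hRHS, beq_self_eq_true]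
        · have h1 : List.countP (fun c => (pvTitleWords c).contains w) (c0 :: rest)
              ≠ (c0 :: rest).length := by
            intro he
            exact hall (fun c hc => List.countP_eq_length.mp he c (List.mem_cons_of_mem _ hc))
          have hLHS : (((List.countP (fun c => (pvTitleWords c).contains w) (c0 :: rest) : Nat) : Int)
              == (((c0 :: rest).length : Nat) : Int)) = false :=
            beq_eq_false_iff_ne.mpr (by exact_mod_cast h1)
          have hRHS : rest.all (fun c => (pvTitleWords c).contains w) = false := by
            rw [List.all_eq_false]
            push Not at hall
            obtain ⟨c, hc, hcc⟩ := hall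
            exact ⟨c, hc, by simpa [PySem.Set.contains] using hcc⟩
          rw [hLHS, hRHS]
      · intro y hy
        rw [pv_count_flatMap] at hy
        have h1 : List.countP (fun c => (pvTitleWords c).contains y) (c0 :: rest)
            = (c0 :: rest).length := by exact_mod_cast eq_of_beq hy
        have h2 := List.countP_eq_length.mp h1 c0 (by simp)
        simpa [PySem.Set.contains] using h2
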